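-- pv_equiv track=rewrite | github.com/veoery/Vibe-Blender | src/vibe_blender/agents/editor.py | _strip_blank_lines_with_spans
-- ===== SOURCE A (Python) =====
-- def _strip_blank_lines_with_spans(text: str) -> tuple[str, list[tuple[int, int]]]:
--     """Strip blank lines and record per-character mapping back to original positions.
--
--     Returns:
--         (stripped_text, spans) where spans[i] = (orig_start, orig_end) for the
--         i-th character in stripped_text.  len(spans) == len(stripped_text).
--     """
--     lines = text.split("\n")
--     kept_line_info: list[tuple[int, int]] = []  # (orig_char_start, line_length)
--
--     orig_offset = 0
--     for line in lines:
--         if line.strip():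
--             kept_line_info.append((orig_offset, len(line)))
--         orig_offset += len(line) + 1  # +1 for \n
--
--     stripped_text = "\n".join(text.split("\n")[0:0])  # will rebuild below
--     stripped_lines: list[str] = []
--     for orig_start, length in kept_line_info:
--         stripped_lines.append(text[orig_start : orig_start + length])
--     stripped_text = "\n".join(stripped_lines)
--
--     # Build per-character span map
--     spans: list[tuple[int, int]] = []
--     for line_idx, (orig_start, orig_len) in enumerate(kept_line_info):
--         for col in range(orig_len):
--             spans.append((orig_start + col, orig_start + col + 1))
--         # \n separator between kept lines (not after the last one)
--         if line_idx < len(kept_line_info) - 1: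
--             spans.append((orig_start + orig_len, orig_start + orig_len + 1))
--
--     return stripped_text, spans
-- ===== SOURCE B (Python) =====
-- def _strip_blank_lines_with_spans(text: str) -> tuple[str, list[tuple[int, int]]]:
--     """Single pass over the lines: build the span list first, then derive the
--     stripped text from the spans themselves."""
--     spans: list[tuple[int, int]] = []
--     sep: int | None = None  # original index of the '\n' right after the last kept line
--     offset = 0
--     for line in text.split("\n"):
--         if line.strip():
--             if sep is not None:
--                 spans.append((sep, sep + 1))
--             end = offset + len(line)
--             spans.extend((k, k + 1) for k in range(offset, end))
--             sep = end
--         offset += len(line) + 1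
--     stripped_text = "".join(text[s:e] for s, e in spans)
--     return stripped_text, spans
-- ===== Notes on version B (the rewrite author's own statement) =====
-- stated objective: alternative
-- what changed: B replaces A's three separate passes (collect kept-line info, rebuild the text from line slices, build spans with an enumerate/look-ahead loop) by a single pass over the lines that builds the span list first -- prepending the separator span via an Option instead of A's index-vs-length look-ahead -- and then derives the stripped text directly from the spans by joining the slices text[s:e].
import Mathlib
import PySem

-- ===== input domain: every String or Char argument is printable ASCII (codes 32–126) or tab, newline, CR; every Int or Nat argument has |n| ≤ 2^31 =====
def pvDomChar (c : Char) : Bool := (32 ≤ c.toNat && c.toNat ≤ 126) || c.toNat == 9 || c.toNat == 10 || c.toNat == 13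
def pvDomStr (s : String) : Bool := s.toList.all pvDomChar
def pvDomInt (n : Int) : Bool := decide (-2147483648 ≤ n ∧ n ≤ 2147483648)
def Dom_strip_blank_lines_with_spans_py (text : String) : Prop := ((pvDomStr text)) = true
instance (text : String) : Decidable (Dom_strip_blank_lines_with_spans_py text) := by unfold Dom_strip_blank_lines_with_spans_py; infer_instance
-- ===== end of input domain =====

-- B replaces A's three passes (collect kept-line info, rebuild the text, build spans) by a single pass over the
-- lines that builds the span list first and then derives the stripped text from the spans; alternative decomposition,
-- no speed claim.

-- ===== PORT A =====
def strip_blank_lines_with_spans_py (text : String) : String × (List (Int × Int)) :=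
  let cs := text.toList
  let lines := PySem.Chars.splitOn cs ['\n']
  -- for line in lines: if line.strip(): kept_line_info.append((orig_offset, len(line))); orig_offset += len(line)+1
  let kept_line_info := (lines.foldl (fun (st : List (Int × Int) × Int) line =>
      (if (PySem.Chars.strip line).isEmpty then st.1 else st.1 ++ [(st.2, (line.length : Int))],
       st.2 + (line.length : Int) + 1)) ([], 0)).1
  -- dead Python assignment: stripped_text = "\n".join(text.split("\n")[0:0])  (overwritten just below)
  let _dead := PySem.Chars.join ['\n'] (PySem.List.slice (PySem.Chars.splitOn cs ['\n']) (some 0) (some 0))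
  -- for orig_start, length in kept_line_info: stripped_lines.append(text[orig_start : orig_start+length])
  let stripped_lines := kept_line_info.foldl (fun acc p =>
      acc ++ [PySem.Chars.slice cs (some p.1) (some (p.1 + p.2))]) ([] : List (List Char))
  let stripped_text := PySem.Chars.join ['\n'] stripped_lines
  -- for line_idx, (orig_start, orig_len) in enumerate(kept_line_info): …
  let spans := (PySem.List.enumerate kept_line_info).foldl (fun acc pr =>
      let acc' := acc ++ (PySem.List.pyRange 0 pr.2.2 1).map (fun col => (pr.2.1 + col, pr.2.1 + col + 1))
      if pr.1 < (kept_line_info.length : Int) - 1 then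
        acc' ++ [(pr.2.1 + pr.2.2, pr.2.1 + pr.2.2 + 1)]
      else acc') []
  (String.ofList stripped_text, spans)

-- ===== PORT B =====
def strip_blank_lines_with_spans_py_alt (text : String) : String × (List (Int × Int)) :=
  let cs := text.toList
  -- single pass: for line in text.split("\n"): if line.strip(): …  (state = (spans, sep, offset))
  let st := (PySem.Chars.splitOn cs ['\n']).foldl (fun (st : List (Int × Int) × Option Int × Int) line =>
      if (PySem.Chars.strip line).isEmpty then
        (st.1, st.2.1, st.2.2 + (line.length : Int) + 1)
      else
        let withSep := match st.2.1 with
          | some p => st.1 ++ [(p, p + 1)]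
          | none => st.1
        let lineEnd := st.2.2 + (line.length : Int)
        (withSep ++ (PySem.List.pyRange st.2.2 lineEnd 1).map (fun k => (k, k + 1)),
         some lineEnd, st.2.2 + (line.length : Int) + 1))
    ([], none, 0)
  let spans := st.1
  -- stripped_text = "".join(text[s:e] for s, e in spans)
  let stripped_text := PySem.Chars.join [] (spans.map (fun q => PySem.Chars.slice cs (some q.1) (some q.2)))
  (String.ofList stripped_text, spans)

-- ===== PRECONDITION & SPEC =====
def Spec_strip_blank_lines_with_spans_py (text : String) (out : String × (List (Int × Int))) : Prop := out = strip_blank_lines_with_spans_py_alt text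
instance (text : String) (out : String × (List (Int × Int))) : Decidable (Spec_strip_blank_lines_with_spans_py text out) := by unfold Spec_strip_blank_lines_with_spans_py; infer_instance

-- ===== CLAIM (what is proved, stated in full; the proofs are below) =====
def Claim_equal_strip_blank_lines_with_spans_py : Prop := ∀ (text : String), Dom_strip_blank_lines_with_spans_py text → Spec_strip_blank_lines_with_spans_py text (strip_blank_lines_with_spans_py text)

-- ===== LEMMAS AND PROOFS =====

def pvSplitAux (c : Char) : List Char → List Char → List (List Char)
  | [], cur => [cur.reverse]
  | a :: rest, cur => if a = c then cur.reverse :: pvSplitAux c rest [] else pvSplitAux c rest (a :: cur)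

lemma pvSplitAux_ne_nil (c : Char) (l cur : List Char) : pvSplitAux c l cur ≠ [] := by
  induction l generalizing cur with
  | nil => simp [pvSplitAux]
  | cons a rest ih => by_cases h : a = c <;> simp [pvSplitAux, h, ih]

lemma pvSplitOn_go_spec (c : Char) (fuel : Nat) (l cur : List Char) (acc : List (List Char))
    (h : l.length < fuel) :
    PySem.Chars.splitOn.go [c] fuel l cur acc = acc.reverse ++ pvSplitAux c l cur := by
  induction l generalizing fuel cur acc with
  | nil =>
      match fuel, h with
      | fuel + 1, _ => simp [PySem.Chars.splitOn.go, pvSplitAux]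
  | cons a rest ih =>
      match fuel, h with
      | fuel + 1, h =>
        by_cases hac : a = c
        · subst hac
          rw [PySem.Chars.splitOn.go]
          simp only [List.isPrefixOf, BEq.rfl, Bool.and_true, if_true]
          simp only [List.length_cons, List.length_nil, List.drop_succ_cons, List.drop_zero]
          rw [ih _ _ _ (by simpa using h)]
          simp [pvSplitAux]
        · rw [PySem.Chars.splitOn.go]
          have : ([c].isPrefixOf (a :: rest)) = false := by
            simp [List.isPrefixOf]; exact fun hc => absurd hc.symm hac
          rw [this]
          simp only [Bool.false_eq_true, if_false]
          rw [ih _ _ _ (by simpa using h)]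
          simp [pvSplitAux, hac]

lemma pvJoin_pvSplitAux (c : Char) (l cur : List Char) :
    PySem.Chars.join [c] (pvSplitAux c l cur) = cur.reverse ++ l := by
  induction l generalizing cur with
  | nil => simp [pvSplitAux, PySem.Chars.join_singleton]
  | cons a rest ih =>
      by_cases hac : a = c
      · subst hac
        obtain ⟨y, ys, hys⟩ := List.exists_cons_of_ne_nil (pvSplitAux_ne_nil a rest [])
        rw [pvSplitAux, if_pos rfl, hys, PySem.Chars.join_cons_cons, ← hys, ih []]
        simp
      · rw [pvSplitAux, if_neg hac, ih (a :: cur)]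
        simp

lemma pvJoin_splitOn (c : Char) (cs : List Char) :
    PySem.Chars.join [c] (PySem.Chars.splitOn cs [c]) = cs := by
  rw [PySem.Chars.splitOn, pvSplitOn_go_spec c _ _ _ _ (by omega)]
  simpa using pvJoin_pvSplitAux c cs []

lemma pvJoin_nil_flatten (xss : List (List Char)) : PySem.Chars.join [] xss = xss.flatten := by
  induction xss with
  | nil => simp [PySem.Chars.join_nil]
  | cons x xs ih =>
      cases xs with
      | nil => simp [PySem.Chars.join_singleton]
      | cons y ys => rw [PySem.Chars.join_cons_cons] at *; simp_all

lemma pvJoin_cons (sep x : List Char) (xs : List (List Char)) :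
    PySem.Chars.join sep (x :: xs) = x ++ (if xs.isEmpty then [] else sep ++ PySem.Chars.join sep xs) := by
  cases xs with
  | nil => simp [PySem.Chars.join_singleton]
  | cons y ys => rw [PySem.Chars.join_cons_cons]; simp

def pvBlank (l : List Char) : Bool := (PySem.Chars.strip l).isEmpty
def pvInfo : List (List Char) → Int → List (Int × Int)
  | [], _ => []
  | l :: L, off => (if pvBlank l then [] else [(off, (l.length : Int))]) ++ pvInfo L (off + (l.length : Int) + 1)
def pvSeg (s n : Int) : List (Int × Int) := (PySem.List.pyRange s (s + n) 1).map (fun k => (k, k + 1))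
def pvInterA : List (Int × Int) → List (Int × Int)
  | [] => []
  | (s, n) :: rest => pvSeg s n ++ (if rest.isEmpty then [] else [(s + n, s + n + 1)]) ++ pvInterA rest
def pvInterB (sep : Option Int) : List (Int × Int) → List (Int × Int)
  | [] => []
  | (s, n) :: rest =>
      (match sep with | some p => [(p, p + 1)] | none => []) ++ pvSeg s n ++ pvInterB (some (s + n)) rest

lemma pvInfoFold (L : List (List Char)) (acc : List (Int × Int)) (off : Int) :
    (L.foldl (fun (st : List (Int × Int) × Int) line =>
      (if (PySem.Chars.strip line).isEmpty then st.1 else st.1 ++ [(st.2, (line.length : Int))],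
       st.2 + (line.length : Int) + 1)) (acc, off)).1 = acc ++ pvInfo L off := by
  induction L generalizing acc off with
  | nil => simp [pvInfo]
  | cons l L ih =>
      simp only [List.foldl_cons]
      by_cases hb : (PySem.Chars.strip l).isEmpty = true
      · rw [if_pos hb, ih]; simp [pvInfo, pvBlank, hb]
      · rw [if_neg hb, ih]; simp [pvInfo, pvBlank, hb]

lemma pvSegA (s n : Int) :
    (PySem.List.pyRange 0 n 1).map (fun col => (s + col, s + col + 1)) = pvSeg s n := by
  simp [pvSeg, PySem.List.pyRange_one, List.map_map, Function.comp_def, add_assoc]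

lemma pvSpansFoldA (N : Int) (info : List (Int × Int)) (i0 : Int) (acc : List (Int × Int))
    (hN : i0 + (info.length : Int) = N) :
    (PySem.List.enumerate info i0).foldl (fun acc pr =>
      if pr.1 < N - 1 then
        acc ++ (PySem.List.pyRange 0 pr.2.2 1).map (fun col => (pr.2.1 + col, pr.2.1 + col + 1))
          ++ [(pr.2.1 + pr.2.2, pr.2.1 + pr.2.2 + 1)]
      else
        acc ++ (PySem.List.pyRange 0 pr.2.2 1).map (fun col => (pr.2.1 + col, pr.2.1 + col + 1))) acc
    = acc ++ pvInterA info := by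
  induction info generalizing i0 acc with
  | nil => simp [PySem.List.enumerate_nil, pvInterA]
  | cons p rest ih =>
      obtain ⟨s, n⟩ := p
      rw [PySem.List.enumerate_cons]
      simp only [List.foldl_cons, List.length_cons] at *
      by_cases hr : rest = []
      · subst hr
        have hcond : ¬ (i0 < N - 1) := by
          simp only [List.length_nil] at hN; push_cast at hN; omega
        simp [hcond, pvInterA, pvSegA, PySem.List.enumerate_nil]
      · have hcond : i0 < N - 1 := by
          have h1 : 0 < rest.length := List.length_pos_of_ne_nil hr
          push_cast at hN; omega
        have hrec := ih (i0 + 1)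
          (acc ++ (PySem.List.pyRange 0 n 1).map (fun col => (s + col, s + col + 1))
            ++ [(s + n, s + n + 1)]) (by push_cast at hN ⊢; omega)
        simp only [hcond, if_pos] at hrec ⊢
        rw [hrec]
        simp [pvInterA, pvSegA, hr]

lemma pvInterAB (info : List (Int × Int)) :
    pvInterB none info = pvInterA info ∧
    ∀ p : Int, pvInterB (some p) info = (if info.isEmpty then [] else (p, p + 1) :: pvInterA info) := by
  induction info with
  | nil => simp [pvInterA, pvInterB]
  | cons q rest ih =>
      obtain ⟨s, n⟩ := q
      constructor
      · rw [pvInterB, pvInterA, ih.2 (s + n)]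
        cases rest <;> simp [pvInterA]
      · intro p
        rw [pvInterB, ih.2 (s + n)]
        cases rest <;> simp [pvInterA]

lemma pvSpansFoldB (L : List (List Char)) (spans0 : List (Int × Int)) (sep0 : Option Int) (off : Int) :
    (L.foldl (fun (st : List (Int × Int) × Option Int × Int) line =>
      if (PySem.Chars.strip line).isEmpty then
        (st.1, st.2.1, st.2.2 + (line.length : Int) + 1)
      else
        let withSep := match st.2.1 with
          | some p => st.1 ++ [(p, p + 1)]
          | none => st.1
        let lineEnd := st.2.2 + (line.length : Int)
        (withSep ++ (PySem.List.pyRange st.2.2 lineEnd 1).map (fun k => (k, k + 1)),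
         some lineEnd, st.2.2 + (line.length : Int) + 1)) (spans0, sep0, off)).1
    = spans0 ++ pvInterB sep0 (pvInfo L off) := by
  induction L generalizing spans0 sep0 off with
  | nil => simp [pvInfo, pvInterB]
  | cons l L ih =>
      simp only [List.foldl_cons, pvInfo, pvBlank]
      by_cases hb : (PySem.Chars.strip l).isEmpty
      · simp only [hb, if_pos, List.nil_append]
        rw [ih]
      · simp only [hb, Bool.false_eq_true, if_false]
        rw [ih]
        cases sep0 <;> simp [pvInterB, pvSeg]

-- a slice by original positions reads back exactly the middle piece
lemma pvSliceAt (pre mid rest : List Char) :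
    PySem.List.slice (pre ++ mid ++ rest) (some (pre.length : Int))
      (some ((pre.length : Int) + (mid.length : Int))) = mid := by
  have e : ((pre.length : Int) + (mid.length : Int)) = ((pre.length + mid.length : Nat) : Int) := by
    push_cast; ring
  rw [e, PySem.List.slice_natCast]
  rw [List.append_assoc, List.drop_left]
  simp

-- concatenating the single-character slices of [s, s+n) gives the slice [s, s+n)
lemma pvSegJoin (cs : List Char) (s n : Nat) :
    ((pvSeg (s : Int) (n : Int)).map (fun q => PySem.List.slice cs (some q.1) (some q.2))).flatten
    = (cs.drop s).take n := by
  induction n generalizing s with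
  | zero => simp [pvSeg, PySem.List.pyRange_one_eq_nil]
  | succ n ih =>
      have h1 : (s : Int) < (s : Int) + ((n : Int) + 1) := by omega
      rw [pvSeg, show (((n + 1 : Nat)) : Int) = (n : Int) + 1 by push_cast; ring,
        PySem.List.pyRange_one_cons h1]
      simp only [List.map_cons, List.flatten_cons]
      rw [show (s : Int) + 1 = ((s + 1 : Nat) : Int) by push_cast; ring]
      rw [PySem.List.slice_natCast]
      have e3 : (s : Int) + ((n : Int) + 1) = ((s + 1 : Nat) : Int) + (n : Int) := by push_cast; ring
      rw [e3]
      have htail := ih (s + 1)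
      rw [pvSeg] at htail
      rw [htail]
      rw [show s + 1 - s = 1 by omega]
      rw [show n + 1 = 1 + n by omega, List.take_add]
      congr 1
      rw [List.drop_drop]
      try congr 1
      try omega

-- the per-character spans of a line concatenate back to that line
lemma pvSegFlattenAt (pre mid rest : List Char) :
    ((pvSeg (pre.length : Int) (mid.length : Int)).map
      (fun q => PySem.List.slice (pre ++ mid ++ rest) (some q.1) (some q.2))).flatten = mid := by
  rw [pvSegJoin, List.append_assoc, List.drop_left]
  simp

-- master lemma: joining B's per-span slices reproduces "\n".join of A's per-line slices
lemma pvBig (L : List (List Char)) :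
    ∀ (pre cs : List Char), cs = pre ++ PySem.Chars.join ['\n'] L →
    ∀ (sep0 : Option Int),
      (∀ p, sep0 = some p → PySem.List.slice cs (some p) (some (p + 1)) = ['\n']) →
    PySem.Chars.join [] ((pvInterB sep0 (pvInfo L (pre.length : Int))).map
        (fun q => PySem.List.slice cs (some q.1) (some q.2)))
    = (if (pvInfo L (pre.length : Int)).isEmpty then [] else
        (match sep0 with | some _ => ['\n'] | none => [])) ++
      PySem.Chars.join ['\n'] ((pvInfo L (pre.length : Int)).map
        (fun p => PySem.List.slice cs (some p.1) (some (p.1 + p.2)))) := by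
  induction L with
  | nil => intro pre cs h sep0 hsep; simp [pvInfo, pvInterB, PySem.Chars.join_nil]
  | cons l L ih =>
    intro pre cs h sep0 hsep
    by_cases hb : pvBlank l
    · cases L with
      | nil => simp [pvInfo, hb, pvInterB, PySem.Chars.join_nil]
      | cons l2 L2 =>
        have h' : cs = (pre ++ l ++ ['\n']) ++ PySem.Chars.join ['\n'] (l2 :: L2) := by
          rw [h, PySem.Chars.join_cons_cons]; simp
        have hrec := ih (pre ++ l ++ ['\n']) cs h' sep0 hsep
        have hlen : (((pre ++ l ++ ['\n']).length : Nat) : Int)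
            = (pre.length : Int) + (l.length : Int) + 1 := by simp; ring
        rw [hlen] at hrec
        simpa [pvInfo, hb] using hrec
    · -- kept line: cs = pre ++ l ++ tail for some tail
      obtain ⟨tail, htail, hsepchar⟩ :
          ∃ tail, cs = pre ++ l ++ tail ∧ (L ≠ [] → tail = '\n' :: PySem.Chars.join ['\n'] L) := by
        cases L with
        | nil => exact ⟨[], by rw [h, PySem.Chars.join_singleton]; simp, by simp⟩
        | cons l2 L2 =>
            refine ⟨'\n' :: PySem.Chars.join ['\n'] (l2 :: L2), ?_, fun _ => rfl⟩
            rw [h, PySem.Chars.join_cons_cons]; simp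
      have hline : PySem.List.slice cs (some (pre.length : Int))
          (some ((pre.length : Int) + (l.length : Int))) = l := by
        rw [htail]; exact pvSliceAt pre l tail
      have hseg : ((pvSeg (pre.length : Int) (l.length : Int)).map
          (fun q => PySem.List.slice cs (some q.1) (some q.2))).flatten = l := by
        rw [htail]; exact pvSegFlattenAt pre l tail
      rw [pvInfo]
      simp only [hb, Bool.false_eq_true, if_false, List.singleton_append, List.map_cons,
        List.isEmpty_cons]
      rw [pvInterB.eq_def]
      dsimp only
      rw [pvJoin_nil_flatten]
      simp only [List.map_append, List.flatten_append]
      rw [pvJoin_cons, hline]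
      rw [hseg]
      cases L with
      | nil =>
        simp only [pvInfo, pvInterB, List.map_nil, List.flatten_nil, List.isEmpty_nil,
          List.append_nil]
        cases sep0 with
        | none => simp
        | some p => simp [hsep p rfl]
      | cons l2 L2 =>
        have h' : cs = (pre ++ l ++ ['\n']) ++ PySem.Chars.join ['\n'] (l2 :: L2) := by
          rw [htail, hsepchar (by simp)]; simp
        have hsep' : PySem.List.slice cs (some ((pre.length : Int) + (l.length : Int)))
            (some ((pre.length : Int) + (l.length : Int) + 1)) = ['\n'] := by
          have e : (pre.length : Int) + (l.length : Int) = (((pre ++ l).length : Nat) : Int) := by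
            simp
          rw [e]
          have e1 : (((pre ++ l).length : Nat) : Int) + 1
              = (((pre ++ l).length : Nat) : Int) + (((['\n'] : List Char).length : Nat) : Int) := by
            simp
          rw [e1, show cs = (pre ++ l) ++ ['\n'] ++ ('\n' :: PySem.Chars.join ['\n'] (l2 :: L2)).tail by
            rw [h']; simp]
          exact pvSliceAt (pre ++ l) ['\n'] _
        have hrec := ih (pre ++ l ++ ['\n']) cs h'
          (some ((pre.length : Int) + (l.length : Int)))
          (by intro p hp; injection hp with hp; rw [← hp]; exact hsep')
        have hlen : (((pre ++ l ++ ['\n']).length : Nat) : Int)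
            = (pre.length : Int) + (l.length : Int) + 1 := by simp; ring
        rw [hlen] at hrec
        rw [pvJoin_nil_flatten] at hrec
        rw [hrec]
        cases hinfo : (pvInfo (l2 :: L2) ((pre.length : Int) + (l.length : Int) + 1)).isEmpty
        · cases sep0 with
          | none => simp [hinfo]
          | some p => simp [hsep p rfl, hinfo]
        · have hnil : pvInfo (l2 :: L2) ((pre.length : Int) + (l.length : Int) + 1) = [] :=
            List.isEmpty_iff.mp hinfo
          cases sep0 with
          | none => simp [hnil, PySem.Chars.join_nil]
          | some p => simp [hsep p rfl, hnil, PySem.Chars.join_nil]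

-- ===== VERDICT (by name: the statement is the Claim_ definition above) =====
theorem strip_blank_lines_with_spans_py_spec : Claim_equal_strip_blank_lines_with_spans_py := by
  intro text _hdom
  unfold Spec_strip_blank_lines_with_spans_py
  unfold strip_blank_lines_with_spans_py strip_blank_lines_with_spans_py_alt
  dsimp only
  set cs := text.toList with hcs
  set L := PySem.Chars.splitOn cs ['\n'] with hLdef
  rw [pvInfoFold, pvSpansFoldB]
  simp only [List.nil_append, PySem.Chars.slice_eq_listSlice]
  rw [PySem.List.foldl_append_singleton_eq_map]
  have hsplit : cs = ([] : List Char) ++ PySem.Chars.join ['\n'] L := by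
    rw [hLdef]; simpa using (pvJoin_splitOn '\n' cs).symm
  have hbig := pvBig L [] cs hsplit none (by intro p hp; cases hp)
  simp only [List.length_nil, Nat.cast_zero] at hbig
  simp only [Prod.mk.injEq]
  constructor
  · rw [hbig]
    cases (pvInfo L 0).isEmpty <;> simp
  · rw [(pvInterAB (pvInfo L 0)).1]
    exact (pvSpansFoldA ((pvInfo L 0).length : Int) (pvInfo L 0) 0 [] (by simp)).trans
      (List.nil_append _)
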